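-- pv_equiv track=rewrite | github.com/KLINGTdotNET/stringologie-ss14 | src/bm.py | get_suff
-- ===== SOURCE A (Python) =====
-- def get_suff(pat):
--     m = len(pat)
--     g = m-1
--     suff = [ 0 for _ in range(0, m)] # initialize
--     suff[m-1] = m
--     for i in reversed(range(0, m-1)):  # m-1 because the upper bound is exclusive
--             if i > g and suff[i+m-1-f] < i-g:
--                 #suff[i] = min(suff[i+m-1-f], i-g)
--                 suff[i] = suff[i+m-1-f]
--             else:
--                 if i < g:
--                     g = i
--                 f = i
--                 while g >= 0 and pat[g] == pat[g+m-1-f]: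
--                     g -= 1
--                 suff[i] = f-g
--     return suff
-- ===== SOURCE B (Python) =====
-- def get_suff(pat):
--     m = len(pat)
--     suff = [0] * m
--     suff[m-1] = m
--     for i in reversed(range(0, m-1)):
--         j = i
--         k = m - 1
--         while j >= 0 and pat[j] == pat[k]:
--             j -= 1
--             k -= 1
--         suff[i] = i - j
--     return suff
-- ===== Notes on version B (the rewrite author's own statement) =====
-- stated objective: simpler
-- what changed: Replaces A's amortized g/f window bookkeeping (reusing previously computed suff entries) with an independent backward two-pointer scan from each position, i.e. the suff table computed directly from its definition.
import Mathlib
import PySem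

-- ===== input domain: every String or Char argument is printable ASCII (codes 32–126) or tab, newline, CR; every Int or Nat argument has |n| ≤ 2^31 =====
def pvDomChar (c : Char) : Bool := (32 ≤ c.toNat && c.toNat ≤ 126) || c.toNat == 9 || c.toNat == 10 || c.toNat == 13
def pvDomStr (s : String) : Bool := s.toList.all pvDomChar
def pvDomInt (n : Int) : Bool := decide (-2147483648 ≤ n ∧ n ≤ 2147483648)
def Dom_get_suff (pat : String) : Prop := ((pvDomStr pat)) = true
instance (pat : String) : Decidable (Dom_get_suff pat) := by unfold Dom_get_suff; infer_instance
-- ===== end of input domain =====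

-- B computes the Boyer-Moore suff table directly from its definition (an independent
-- backward scan per position) instead of A's amortized g/f window bookkeeping.
-- Both Pythons raise IndexError exactly on the empty pattern (excluded by Pre_).

-- ===== PORT A =====
-- shared in-range indexing helper: Python pat[x]; every index either program reads is
-- in range on Pre_ inputs, so getD with a dummy default is exact there
def pg (p : List Char) (x : Int) : Char := p.getD x.toNat ' '
def scanA (p : List Char) (d : Int) (g : Int) : Int :=
  if 0 ≤ g ∧ pg p g = pg p (g + d) then scanA p d (g - 1) else g
termination_by (g + 1).toNat
decreasing_by omega

def get_suff (pat : String) : List Int :=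
  let p := pat.toList
  let m : Int := p.length
  let g0 : Int := m - 1
  let suff0 : List Int := (List.range p.length).map (fun _ => (0 : Int))
  let suff1 := suff0.set (m - 1).toNat m
  let step : (Int × Int × List Int) → Int → (Int × Int × List Int) := fun st i =>
    let g := st.1; let f := st.2.1; let suff := st.2.2
    if g < i ∧ suff.getD (i + m - 1 - f).toNat 0 < i - g then
      (g, f, suff.set i.toNat (suff.getD (i + m - 1 - f).toNat 0))
    else
      let g1 := if i < g then i else g
      let f1 := i
      let g2 := scanA p (m - 1 - f1) g1
      (g2, f1, suff.set i.toNat (f1 - g2))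
  let res := ((PySem.List.pyRange 0 (m - 1) 1).reverse).foldl step (g0, g0, suff1)
  res.2.2

-- ===== PORT B =====
-- B's inner while loop: 'while j >= 0 and pat[j] == pat[k]: j -= 1; k -= 1', returns the final j
def scanB (p : List Char) (j : Int) (k : Int) : Int :=
  if 0 ≤ j ∧ pg p j = pg p k then scanB p (j - 1) (k - 1) else j
termination_by (j + 1).toNat
decreasing_by omega

def get_suff_alt (pat : String) : List Int :=
  let p := pat.toList
  let m : Int := p.length
  let suff0 : List Int := List.replicate p.length (0 : Int)
  let suff1 := suff0.set (m - 1).toNat m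
  ((PySem.List.pyRange 0 (m - 1) 1).reverse).foldl
    (fun suff i => suff.set i.toNat (i - scanB p i (m - 1))) suff1

-- ===== PRECONDITION & SPEC =====
-- Pre_ excludes only the empty pattern, on which both A and B raise IndexError (the 'suff[m-1] = m' assignment)
def Pre_get_suff (pat : String) : Prop := pat ≠ ""
instance (pat : String) : Decidable (Pre_get_suff pat) := by unfold Pre_get_suff; infer_instance
def pvWitness_get_suff : String := "abcab"

def Spec_get_suff (pat : String) (out : List Int) : Prop := out = get_suff_alt pat
instance (pat : String) (out : List Int) : Decidable (Spec_get_suff pat out) := by unfold Spec_get_suff; infer_instance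

-- ===== CLAIM (what is proved, stated in full; the proofs are below) =====
def Claim_equal_get_suff : Prop := ∀ (pat : String), Dom_get_suff pat → Pre_get_suff pat → Spec_get_suff pat (get_suff pat)

-- ===== LEMMAS AND PROOFS =====

-- the value B stores at position i (i minus the final j of the backward scan)
def sval (p : List Char) (i : Int) : Int := i - scanB p i ((p.length : Int) - 1)

theorem scanA_eq_scanB (p : List Char) (d : Int) (g : Int) :
    scanA p d g = scanB p g (g + d) := by
  generalize hfuel : (g + 1).toNat = fuel
  induction fuel generalizing g with
  | zero =>
    rw [scanA, scanB]
    have : ¬ (0 ≤ g) := by omega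
    simp [this]
  | succ n ih =>
    rw [scanA, scanB]
    by_cases h : 0 ≤ g ∧ pg p g = pg p (g + d)
    · rw [if_pos h, if_pos h, show g + d - 1 = g - 1 + d by ring]
      exact ih (g - 1) (by omega)
    · rw [if_neg h, if_neg h]

theorem scanB_char (p : List Char) (j k : Int) (hj : -1 ≤ j) :
    -1 ≤ scanB p j k ∧ scanB p j k ≤ j ∧
    (∀ t, scanB p j k < t → t ≤ j → pg p t = pg p (t + (k - j))) ∧
    (0 ≤ scanB p j k → pg p (scanB p j k) ≠ pg p (scanB p j k + (k - j))) := by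
  generalize hfuel : (j + 1).toNat = fuel
  induction fuel generalizing j k with
  | zero =>
    have hj0 : j = -1 := by omega
    rw [scanB, if_neg (fun hc => absurd hc.1 (by omega : ¬ (0 ≤ j)))]
    refine ⟨by omega, le_refl _, by intro t ht1 ht2; exact absurd ht2 (by omega),
      by intro h0; exact absurd h0 (by omega)⟩
  | succ n ih =>
    rw [scanB]
    by_cases h : 0 ≤ j ∧ pg p j = pg p k
    · rw [if_pos h]
      obtain ⟨ih1, ih2, ih3, ih4⟩ := ih (j-1) (k-1) (by omega) (by omega)
      have hoff : k - 1 - (j - 1) = k - j := by ring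
      rw [hoff] at ih3 ih4
      refine ⟨ih1, by omega, ?_, ih4⟩
      intro t h1 h2
      rcases lt_or_eq_of_le h2 with h2' | h2'
      · exact ih3 t h1 (by omega)
      · subst h2'
        rw [show t + (k - t) = k by ring]
        exact h.2
    · rw [if_neg h]
      refine ⟨hj, le_refl _, by intro t h1 h2; omega, ?_⟩
      intro h0
      rw [show j + (k - j) = k by ring]
      intro hc
      exact h ⟨h0, hc⟩

theorem scanB_eq_of (p : List Char) (j k r : Int) (h1 : -1 ≤ r) (h2 : r ≤ j)
    (hm : ∀ t, r < t → t ≤ j → pg p t = pg p (t + (k - j)))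
    (hms : 0 ≤ r → pg p r ≠ pg p (r + (k - j))) : scanB p j k = r := by
  generalize hfuel : (j + 1).toNat = fuel
  induction fuel generalizing j k with
  | zero =>
    rw [scanB, if_neg (fun hc => absurd hc.1 (by omega : ¬ (0 ≤ j)))]
    omega
  | succ n ih =>
    rw [scanB]
    rcases lt_or_eq_of_le h2 with hlt | heq
    · have hjk : pg p j = pg p k := by
        have := hm j hlt (le_refl _)
        rwa [show j + (k - j) = k by ring] at this
      have hj0 : 0 ≤ j := by omega
      rw [if_pos ⟨hj0, hjk⟩]
      apply ih (j-1) (k-1) (by omega)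
      · intro t ht1 ht2
        have := hm t ht1 (by omega)
        rwa [show k - 1 - (j - 1) = k - j by ring]
      · intro h0
        have := hms h0
        rwa [show k - 1 - (j - 1) = k - j by ring]
      · omega
    · subst heq
      have hneg : ¬ (0 ≤ r ∧ pg p r = pg p k) := by
        intro hc
        exact hms hc.1 (by rw [show r + (k - r) = k by ring]; exact hc.2)
      rw [if_neg hneg]

theorem scanB_shift (p : List Char) (j k : Int) (n : Nat) (hjn : -1 ≤ j - n)
    (hm : ∀ s : Int, 0 ≤ s → s < n → pg p (j - s) = pg p (k - s)) :
    scanB p j k = scanB p (j - n) (k - n) := by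
  induction n generalizing j k with
  | zero => simp
  | succ n ih =>
    have hjk : pg p j = pg p k := by
      have := hm 0 (le_refl _) (by push_cast; omega)
      simpa using this
    have hj0 : 0 ≤ j := by push_cast at hjn ⊢; omega
    rw [scanB, if_pos ⟨hj0, hjk⟩]
    have := ih (j-1) (k-1) (by push_cast at hjn ⊢; omega)
      (by intro s hs1 hs2
          have := hm (s+1) (by omega) (by push_cast; omega)
          rw [show j - 1 - s = j - (s+1) by ring, show k - 1 - s = k - (s+1) by ring]
          exact this)
    rw [this, show j - 1 - n = j - (n+1 : Nat) by push_cast; ring,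
        show k - 1 - n = k - (n+1 : Nat) by push_cast; ring]

theorem getD_set_self (l : List Int) (n : Nat) (a : Int) (h : n < l.length) :
    (l.set n a).getD n 0 = a := by
  simp [List.getD_eq_getElem?_getD, h]

theorem getD_set_ne (l : List Int) (n t : Nat) (a : Int) (h : t ≠ n) :
    (l.set n a).getD t 0 = l.getD t 0 := by
  simp [List.getD_eq_getElem?_getD, List.getElem?_set_ne (Ne.symm h)]

theorem foldB (p : List Char) (n : Nat) (suff : List Int)
    (hn : n ≤ p.length) (hl : suff.length = p.length)
    (hs : ∀ t : Nat, t < p.length → n ≤ t → suff.getD t 0 = sval p t) :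
    (((PySem.List.pyRange 0 (n : Int) 1).reverse).foldl
        (fun s i => s.set i.toNat (i - scanB p i ((p.length : Int) - 1))) suff).length = p.length ∧
    ∀ t : Nat, t < p.length →
      (((PySem.List.pyRange 0 (n : Int) 1).reverse).foldl
        (fun s i => s.set i.toNat (i - scanB p i ((p.length : Int) - 1))) suff).getD t 0 = sval p t := by
  induction n generalizing suff with
  | zero =>
    rw [show ((0:Nat):Int) = 0 by rfl, PySem.List.pyRange_one_eq_nil (by omega)]
    exact ⟨hl, fun t ht => hs t ht (Nat.zero_le t)⟩
  | succ n ih =>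
    rw [show (((n+1:Nat)):Int) = (n:Int) + 1 by push_cast; ring,
        PySem.List.pyRange_one_succ_right (by omega), List.reverse_append,
        List.reverse_singleton, List.singleton_append, List.foldl_cons]
    apply ih
    · omega
    · simpa using hl
    · intro t ht htn
      rcases Nat.eq_or_lt_of_le htn with he | hlt
      · have : ((n:Int)).toNat = t := by omega
        rw [← this] at *
        rw [getD_set_self _ _ _ (by omega)]
        simp only [Int.toNat_natCast] at this ⊢
        subst he
        rfl
      · rw [getD_set_ne _ _ _ _ (by omega)]
        exact hs t ht (by omega)

theorem foldA (p : List Char) (n : Nat) (g f : Int) (suff : List Int)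
    (hn : n + 1 ≤ p.length) (hl : suff.length = p.length)
    (hs : ∀ t : Nat, t < p.length → n ≤ t → suff.getD t 0 = sval p t)
    (hg1 : -1 ≤ g) (hgf : g ≤ f) (hnf : (n : Int) ≤ f) (hf : f ≤ (p.length : Int) - 1)
    (hfg : f = (p.length : Int) - 1 → g = (p.length : Int) - 1)
    (hw : ∀ t : Int, g < t → t ≤ f → pg p t = pg p (t + ((p.length : Int) - 1 - f))) :
    ((((PySem.List.pyRange 0 (n : Int) 1).reverse).foldl
        (fun st i =>
          let g := st.1; let f := st.2.1; let suff := st.2.2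
          if g < i ∧ suff.getD (i + (p.length : Int) - 1 - f).toNat 0 < i - g then
            (g, f, suff.set i.toNat (suff.getD (i + (p.length : Int) - 1 - f).toNat 0))
          else
            let g1 := if i < g then i else g
            let f1 := i
            let g2 := scanA p ((p.length : Int) - 1 - f1) g1
            (g2, f1, suff.set i.toNat (f1 - g2))) (g, f, suff)).2.2).length = p.length ∧
    ∀ t : Nat, t < p.length →
      ((((PySem.List.pyRange 0 (n : Int) 1).reverse).foldl
        (fun st i =>
          let g := st.1; let f := st.2.1; let suff := st.2.2
          if g < i ∧ suff.getD (i + (p.length : Int) - 1 - f).toNat 0 < i - g then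
            (g, f, suff.set i.toNat (suff.getD (i + (p.length : Int) - 1 - f).toNat 0))
          else
            let g1 := if i < g then i else g
            let f1 := i
            let g2 := scanA p ((p.length : Int) - 1 - f1) g1
            (g2, f1, suff.set i.toNat (f1 - g2))) (g, f, suff)).2.2).getD t 0 = sval p t := by
  set M : Int := (p.length : Int) with hM
  induction n generalizing g f suff with
  | zero =>
    rw [show ((0:Nat):Int) = 0 by rfl, PySem.List.pyRange_one_eq_nil (by omega)]
    exact ⟨hl, fun t ht => hs t ht (Nat.zero_le t)⟩
  | succ n ih =>
    rw [show (((n+1:Nat)):Int) = (n:Int) + 1 by push_cast; ring,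
        PySem.List.pyRange_one_succ_right (by omega), List.reverse_append,
        List.reverse_singleton, List.singleton_append, List.foldl_cons]
    dsimp only
    obtain ⟨cb1, cb2, cb3, cb4⟩ := scanB_char p (n : Int) (M - 1) (by omega)
    by_cases hg : g < (n : Int)
    · -- f was set by a genuine scan; the mirror position i' is already computed
      have hfM : f ≤ M - 2 := by
        by_cases hfe : f = M - 1
        · have := hfg hfe; omega
        · omega
      set i' : Int := (n : Int) + M - 1 - f with hi'
      have hi'lb : (n : Int) + 1 ≤ i' := by omega
      have hi'ub : i' ≤ M - 2 := by omega
      have hlook : suff.getD i'.toNat 0 = sval p i' := by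
        have h1 : ((i'.toNat : Int)) = i' := by omega
        have := hs i'.toNat (by omega) (by omega)
        rwa [h1] at this
      obtain ⟨ci1, ci2, ci3, ci4⟩ := scanB_char p i' (M - 1) (by omega)
      set rB : Int := scanB p i' (M - 1) with hrB
      set e : Int := i' - rB with he
      have hsvi : sval p i' = e := by rw [sval, ← hM]
      have he0 : 0 ≤ e := by omega
      have htrans : ∀ t : Int, g < t → t ≤ (n : Int) → (n : Int) - t < e →
          pg p t = pg p (t + (M - 1 - (n : Int))) := by
        intro t ht1 ht2 ht3
        have h1 : pg p t = pg p (t + (M - 1 - f)) := hw t ht1 (by omega)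
        have h2 : pg p (t + (M - 1 - f)) = pg p (t + (M - 1 - f) + (M - 1 - i')) :=
          ci3 (t + (M - 1 - f)) (by omega) (by omega)
        rw [h1, h2, show t + (M - 1 - f) + (M - 1 - i') = t + (M - 1 - (n:Int)) by omega]
      by_cases hlt : suff.getD i'.toNat 0 < (n : Int) - g
      · -- THEN branch: suff[i] copied from suff[i']
        rw [if_pos ⟨hg, hlt⟩]
        have hel : e < (n : Int) - g := by rw [hlook, hsvi] at hlt; exact hlt
        have hkey : scanB p (n : Int) (M - 1) = (n : Int) - e := by
          apply scanB_eq_of p _ _ _ (by omega) (by omega)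
          · intro t ht1 ht2
            exact htrans t (by omega) ht2 (by omega)
          · intro h0 hcontra
            have h1 : pg p ((n:Int) - e) = pg p ((n:Int) - e + (M - 1 - f)) :=
              hw _ (by omega) (by omega)
            rw [show (n:Int) - e + (M - 1 - f) = rB by omega] at h1
            apply ci4 (by omega)
            rw [show rB + (M - 1 - i') = (n:Int) - e + (M - 1 - (n:Int)) by omega, ← h1]
            exact hcontra
        have hstore : suff.getD i'.toNat 0 = sval p ((n:Int)) := by
          rw [hlook, hsvi, sval, ← hM, hkey]; ring
        apply ih g f _ (by omega) (by simpa using hl) _ hg1 hgf (by omega) hf hfg hw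
        intro t ht htn
        rcases Nat.eq_or_lt_of_le htn with heq | hlt2
        · have hnt : ((n:Int)).toNat = t := by omega
          rw [hnt, getD_set_self _ _ _ (by omega)]
          rw [hstore]
          congr 1
          omega
        · rw [show ((n:Int)).toNat = n by omega, getD_set_ne _ _ _ _ (by omega)]
          exact hs t ht (by omega)
      · -- ELSE branch with g < n: resume the scan from g, skipping n - g known matches
        rw [if_neg (fun hc => hlt hc.2)]
        have hif : (if (n:Int) < g then (n:Int) else g) = g := by
          rw [if_neg (by omega)]
        rw [hif]
        have hele : (n : Int) - g ≤ e := by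
          rw [hlook, hsvi] at hlt; omega
        have hkey : scanA p (M - 1 - (n:Int)) g = scanB p (n:Int) (M - 1) := by
          rw [scanA_eq_scanB]
          have hshift := scanB_shift p (n:Int) (M - 1) ((n:Int) - g).toNat
            (by omega)
            (by intro s hs1 hs2
                have hs2' : s < (n:Int) - g := by omega
                have h1 : pg p ((n:Int) - s) = pg p ((n:Int) - s + (M - 1 - f)) :=
                  hw _ (by omega) (by omega)
                have h2 : pg p (i' - s) = pg p (i' - s + (M - 1 - i')) :=
                  ci3 (i' - s) (by omega) (by omega)
                rw [h1, show (n:Int) - s + (M - 1 - f) = i' - s by omega, h2]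
                congr 1
                omega)
          rw [hshift]
          congr 1 <;> omega
        rw [hkey]
        have hsc := cb2
        apply ih (scanB p (n:Int) (M-1)) ((n:Int)) _ (by omega) (by simpa using hl) _
          (by omega) (by omega) (by omega) (by omega) (by intro hc; omega)
          (by intro t ht1 ht2; exact cb3 t ht1 ht2)
        intro t ht htn
        rcases Nat.eq_or_lt_of_le htn with heq | hlt2
        · have hnt : ((n:Int)).toNat = t := by omega
          have hti : ((t:Nat) : Int) = ((n:Nat) : Int) := by omega
          rw [hnt, getD_set_self _ _ _ (by omega), sval, ← hM, hti]
        · rw [show ((n:Int)).toNat = n by omega, getD_set_ne _ _ _ _ (by omega)]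
          exact hs t ht (by omega)
    · -- ELSE branch with n ≤ g: fresh scan from position n itself
      rw [if_neg (fun hc => hg hc.1)]
      have hg1eq : (if (n:Int) < g then (n:Int) else g) = (n:Int) := by
        by_cases hc : (n:Int) < g
        · rw [if_pos hc]
        · rw [if_neg hc]; omega
      rw [hg1eq]
      have hkey : scanA p (M - 1 - (n:Int)) (n:Int) = scanB p (n:Int) (M - 1) := by
        rw [scanA_eq_scanB]
        congr 1
        omega
      rw [hkey]
      apply ih (scanB p (n:Int) (M-1)) ((n:Int)) _ (by omega) (by simpa using hl) _
        (by omega) (by omega) (by omega) (by omega) (by intro hc; omega)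
        (by intro t ht1 ht2; exact cb3 t ht1 ht2)
      intro t ht htn
      rcases Nat.eq_or_lt_of_le htn with heq | hlt2
      · have hnt : ((n:Int)).toNat = t := by omega
        have hti : ((t:Nat) : Int) = ((n:Nat) : Int) := by omega
        rw [hnt, getD_set_self _ _ _ (by omega), sval, ← hM, hti]
      · rw [show ((n:Int)).toNat = n by omega, getD_set_ne _ _ _ _ (by omega)]
        exact hs t ht (by omega)

theorem sval_last (p : List Char) (hp : p ≠ []) :
    sval p ((p.length : Int) - 1) = (p.length : Int) := by
  have hm : 1 ≤ p.length := by
    cases p with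
    | nil => exact absurd rfl hp
    | cons a l => simp
  have hscan : scanB p ((p.length : Int) - 1) ((p.length : Int) - 1) = -1 := by
    apply scanB_eq_of p _ _ _ (by omega) (by omega)
    · intro t ht1 ht2
      rw [show t + ((p.length : Int) - 1 - ((p.length : Int) - 1)) = t by ring]
    · intro h0
      exact absurd h0 (by omega)
  rw [sval, hscan]
  omega

theorem main_eq (pat : String) (hpre : pat ≠ "") : get_suff pat = get_suff_alt pat := by
  have hp : pat.toList ≠ [] := by simpa using hpre
  unfold get_suff get_suff_alt
  dsimp only
  set p : List Char := pat.toList with hpdef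
  have hm : 1 ≤ p.length := by
    cases hcp : p with
    | nil => exact absurd hcp hp
    | cons a l => simp
  have hfix : ((p.length : Int) - 1) = (((p.length - 1 : Nat)) : Int) := by omega
  have hcastT : (((p.length - 1 : Nat)) : Int).toNat = p.length - 1 := by omega
  have hsl : sval p (((p.length - 1 : Nat)) : Int) = (p.length : Int) := by
    rw [← hfix]; exact sval_last p hp
  obtain ⟨hAlen, hAval⟩ := foldA p (p.length - 1) ((((p.length - 1 : Nat))) : Int)
      ((((p.length - 1 : Nat))) : Int)
      (((List.range p.length).map (fun _ => (0 : Int))).set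
        (((p.length - 1 : Nat) : Int)).toNat (p.length : Int))
      (by omega) (by simp)
      (by intro t ht htn
          have ht' : t = p.length - 1 := by omega
          subst ht'
          rw [hcastT, getD_set_self _ _ _ (by simp; omega), hsl])
      (by omega) (by omega) (by omega) (by omega) (by intro h; omega)
      (by intro t ht1 ht2; exact absurd ht2 (by omega))
  obtain ⟨hBlen, hBval⟩ := foldB p (p.length - 1)
      ((List.replicate p.length (0 : Int)).set (((p.length - 1 : Nat) : Int)).toNat (p.length : Int))
      (by omega) (by simp)
      (by intro t ht htn
          have ht' : t = p.length - 1 := by omega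
          subst ht'
          rw [hcastT, getD_set_self _ _ _ (by simp; omega), hsl])
  dsimp only at hAlen hAval hBlen hBval
  rw [hfix] at hAlen hAval hBlen hBval ⊢
  apply List.ext_getElem (by rw [hAlen, hBlen])
  intro t h1 h2
  have htp : t < p.length := by rw [← hAlen]; exact h1
  have hA := hAval t htp
  have hB := hBval t htp
  rw [List.getD_eq_getElem _ 0 h1] at hA
  rw [List.getD_eq_getElem _ 0 h2] at hB
  rw [hA, hB]

-- ===== VERDICT (by name: the statement is the Claim_ definition above) =====
theorem get_suff_spec : Claim_equal_get_suff := by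
  intro pat _ hpre
  exact main_eq pat hpre
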